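-- pv_equiv track=rewrite | github.com/VishalDeoPrasad/InterviewBit | String operations.py | solve
-- ===== SOURCE A (Python) =====
-- def solve(A):
--     A = A*2
--     ans = ""
--     for ch in A:
--         if ord(ch) >=97 and ord(ch) <= 122:
--             if ch in ('a','e','i','o','u'):
--                 ans += '#'
--             else:
--                 ans += ch
--
--     return ans
-- ===== SOURCE B (Python) =====
-- def solve(A):
--     # Staged passes: (1) keep only the lowercase letters, (2) blank out each
--     # vowel with a whole-string replace pass, (3) double the result.
--     t = "".join(filter(str.islower, A))
--     t = t.replace("a", "#").replace("e", "#").replace("i", "#").replace("o", "#").replace("u", "#")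
--     return t * 2
-- ===== Notes on version B (the rewrite author's own statement) =====
-- stated objective: faster
-- what changed: B works in staged whole-string passes -- a filter pass keeping lowercase letters, then five str.replace passes (one per vowel), then doubling the output -- instead of A's single character-by-character loop over the doubled input with branching and += string concatenation.
import Mathlib
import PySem

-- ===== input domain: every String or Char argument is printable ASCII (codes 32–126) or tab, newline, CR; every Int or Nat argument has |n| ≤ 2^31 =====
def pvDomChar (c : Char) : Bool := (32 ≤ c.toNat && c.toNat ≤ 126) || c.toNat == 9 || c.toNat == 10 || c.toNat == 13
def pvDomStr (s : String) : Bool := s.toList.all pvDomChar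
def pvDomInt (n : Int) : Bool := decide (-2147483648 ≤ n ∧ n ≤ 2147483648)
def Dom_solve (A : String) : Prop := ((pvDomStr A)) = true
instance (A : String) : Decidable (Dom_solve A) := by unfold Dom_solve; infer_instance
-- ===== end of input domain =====

-- B rebuilds the answer in staged whole-string passes (filter lowercase, five
-- vowel-replace passes, double the output) instead of A's one branching loop
-- over the doubled input (objective: faster, measured).


-- ===== PORT A =====
-- loop body of A: ans += '#' / ch for lowercase chars, else unchanged
def solveStep (ans : List Char) (ch : Char) : List Char :=
  if 97 ≤ ch.toNat ∧ ch.toNat ≤ 122 then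
    if ch = 'a' ∨ ch = 'e' ∨ ch = 'i' ∨ ch = 'o' ∨ ch = 'u' then ans ++ ['#']
    else ans ++ [ch]
  else ans

def solve (A : String) : String :=
  let l := A.toList ++ A.toList      -- A = A*2
  String.mk (l.foldl solveStep [])

-- ===== PORT B =====
def solve_alt (A : String) : String :=
  let t0 := A.toList.filter PySem.Chars.islower            -- "".join(filter(str.islower, A))
  let t := PySem.Chars.replace (PySem.Chars.replace (PySem.Chars.replace
            (PySem.Chars.replace (PySem.Chars.replace t0
              ['a'] ['#']) ['e'] ['#']) ['i'] ['#']) ['o'] ['#']) ['u'] ['#']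
  String.mk (t ++ t)                                       -- t * 2

-- ===== PRECONDITION & SPEC =====
def Spec_solve (A : String) (out : String) : Prop := out = solve_alt A
instance (A : String) (out : String) : Decidable (Spec_solve A out) := by unfold Spec_solve; infer_instance

-- ===== CLAIM (what is proved, stated in full; the proofs are below) =====
def Claim_equal_solve : Prop := ∀ (A : String), Dom_solve A → Spec_solve A (solve A)

-- ===== LEMMAS AND PROOFS =====

-- per-character value of A's loop body, for the bridge proof
def emit (ch : Char) : List Char :=
  if PySem.Chars.islower ch then
    (if ch = 'a' ∨ ch = 'e' ∨ ch = 'i' ∨ ch = 'o' ∨ ch = 'u' then ['#'] else [ch])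
  else []

lemma lower_iff (ch : Char) : PySem.Chars.islower ch = true ↔ (97 ≤ ch.toNat ∧ ch.toNat ≤ 122) := by
  simp only [PySem.Chars.islower, Bool.and_eq_true, decide_eq_true_eq, Char.le_def,
    UInt32.le_iff_toNat_le, Char.toNat_val]
  constructor <;> (intro ⟨h1, h2⟩; exact ⟨h1, h2⟩)

lemma solveStep_eq (ans : List Char) (ch : Char) : solveStep ans ch = ans ++ emit ch := by
  unfold solveStep emit
  by_cases h : 97 ≤ ch.toNat ∧ ch.toNat ≤ 122
  · rw [if_pos h, if_pos ((lower_iff ch).mpr h)]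
    split_ifs <;> simp
  · rw [if_neg h, if_neg (by simpa [lower_iff] using h)]
    simp

lemma foldl_step (l : List Char) (acc : List Char) :
    l.foldl solveStep acc = acc ++ l.flatMap emit := by
  induction l generalizing acc with
  | nil => simp
  | cons c l ih => simp [List.foldl, solveStep_eq, ih]

-- single-character str.replace is a map
lemma replace_go_single (v r : Char) (l acc : List Char) (fuel : Nat) (h : l.length ≤ fuel) :
    PySem.Chars.replace.go [v] [r] fuel l acc
      = acc.reverse ++ l.map (fun c => if c = v then r else c) := by
  induction l generalizing acc fuel with
  | nil => cases fuel <;> simp [PySem.Chars.replace.go]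
  | cons c t ih =>
    cases fuel with
    | zero => simp at h
    | succ n =>
      simp only [PySem.Chars.replace.go]
      by_cases hv : c = v
      · simp [hv, List.isPrefixOf, ih _ _ (by simpa using h)]
      · have hpre : List.isPrefixOf [v] (c :: t) = false := by
          simp [List.isPrefixOf]
          exact fun hc => hv hc.symm
        simp [hpre, hv, ih _ _ (by simpa using h)]

lemma replace_single (v r : Char) (l : List Char) :
    PySem.Chars.replace l [v] [r] = l.map (fun c => if c = v then r else c) := by
  simp [PySem.Chars.replace, replace_go_single v r l [] l.length le_rfl]

-- ===== VERDICT (by name: the statement is the Claim_ definition above) =====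
theorem solve_spec : Claim_equal_solve := by
  intro A _
  show solve A = solve_alt A
  simp only [solve, solve_alt, foldl_step, List.nil_append, List.flatMap_append,
    replace_single, List.map_map]
  congr 1
  have hmap : ∀ l : List Char,
      l.flatMap emit
        = (l.filter PySem.Chars.islower).map
            ((fun c => if c = 'u' then '#' else c) ∘ (fun c => if c = 'o' then '#' else c) ∘
             (fun c => if c = 'i' then '#' else c) ∘ (fun c => if c = 'e' then '#' else c) ∘
             (fun c => if c = 'a' then '#' else c)) := by
    intro l
    induction l with
    | nil => simp
    | cons c t ih =>
      by_cases h : PySem.Chars.islower c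
      · by_cases hv : c = 'a' ∨ c = 'e' ∨ c = 'i' ∨ c = 'o' ∨ c = 'u'
        · simp [emit, h, hv, ih, Function.comp]
          rcases hv with hv|hv|hv|hv|hv <;> simp [hv]
        · push Not at hv
          obtain ⟨h1, h2, h3, h4, h5⟩ := hv
          simp [emit, h, h1, h2, h3, h4, h5, ih, Function.comp]
      · simp [emit, h, ih]
  simp [hmap]
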